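-- pv_equiv track=rewrite | github.com/Nil-Fernandez-Lojo/PhyloInfer | tree/event.py | get_sol_comb_problem
-- ===== SOURCE A (Python) =====
-- def get_sol_comb_problem(n,d):
-- 	"""
-- 	Get list of all the solution of the following combinatorial problem:
-- 	{x:x in N_0^d, sum(x)=n}
--
-- 	#TODO: this is not optimal, should cache the solutions
-- 	"""
-- 	if (d == 0) or (d>n):
-- 		return []
-- 	elif d == 1:
-- 		return [[n]]
-- 	else:
-- 		sol = []
-- 		for i in range(1,n-d+2):
-- 			partial_sol = get_sol_comb_problem(n-i,d-1)
-- 			for x in partial_sol: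
-- 				x.append(i)
-- 			sol.extend(partial_sol)
-- 		return sol
-- ===== SOURCE B (Python) =====
-- def get_sol_comb_problem(n, d):
--     """Bottom-up DP over the number of parts: level k maps each reachable
--     remainder m to all solutions of (m, k); no recomputation of subproblems."""
--     if d < 1 or d > n:
--         return []
--     prev = {m: [[m]] for m in range(1, n - d + 2)}
--     for k in range(2, d + 1):
--         cur = {}
--         for m in range(k, n - d + k + 1):
--             cur[m] = [x + [i] for i in range(1, m - k + 2) for x in prev[m - i]]
--         prev = cur
--     return prev[n]
-- ===== Notes on version B (the rewrite author's own statement) =====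
-- stated objective: alternative
-- what changed: Replaced the exponential-recomputation top-down recursion by a bottom-up dynamic program over the number of parts that computes each distinct (remainder, parts) subproblem once per level and builds solution lists by copying instead of in-place append.
-- crash fix: For d < 0 with d <= n Python A recurses without reaching a base case and raises RecursionError; B returns []. — e.g. on get_sol_comb_problem(0, -1): A raises RecursionError, B returns []
import Mathlib
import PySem

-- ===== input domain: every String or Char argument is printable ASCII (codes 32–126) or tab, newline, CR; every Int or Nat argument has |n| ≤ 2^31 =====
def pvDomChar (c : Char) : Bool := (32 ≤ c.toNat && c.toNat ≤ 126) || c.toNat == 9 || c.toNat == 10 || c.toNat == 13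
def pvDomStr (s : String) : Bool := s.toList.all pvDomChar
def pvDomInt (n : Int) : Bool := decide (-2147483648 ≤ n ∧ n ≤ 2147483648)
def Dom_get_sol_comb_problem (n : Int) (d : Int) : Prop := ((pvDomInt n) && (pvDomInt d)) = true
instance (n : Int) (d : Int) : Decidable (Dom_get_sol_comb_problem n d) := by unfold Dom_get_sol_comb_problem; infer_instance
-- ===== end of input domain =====

-- B replaces A's top-down overlapping recursion by a bottom-up DP over the number of parts,
-- computing each (remainder, parts) subproblem once per level (objective: alternative).

-- ===== PORT A =====
def get_sol_comb_problem (n : Int) (d : Int) : List (List Int) :=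
  if d == 0 || d > n then []
  else if d == 1 then [[n]]
  else if _h : 2 ≤ d then
    (PySem.List.pyRange 1 (n - d + 2) 1).foldl
      (fun sol i =>
        sol ++ (get_sol_comb_problem (n - i) (d - 1)).map (fun x => x ++ [i])) []
  else []  -- only reachable for d < 0 with d ≤ n, where Python A recurses without bound (excluded by Pre_)
termination_by d.toNat
decreasing_by simp_wf; omega

-- ===== PORT B =====
def get_sol_comb_problem_alt (n : Int) (d : Int) : List (List Int) :=
  if d < 1 || d > n then []
  else
    let base : PySem.Dict Int (List (List Int)) :=
      (PySem.List.pyRange 1 (n - d + 2) 1).foldl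
        (fun dic m => dic.insert m [[m]]) PySem.Dict.empty
    let final : PySem.Dict Int (List (List Int)) :=
      (PySem.List.pyRange 2 (d + 1) 1).foldl
        (fun prev k =>
          (PySem.List.pyRange k (n - d + k + 1) 1).foldl
            (fun cur m =>
              cur.insert m
                ((PySem.List.pyRange 1 (m - k + 2) 1).flatMap
                  (fun i => (prev.getD (m - i) []).map (fun x => x ++ [i]))))
            PySem.Dict.empty)
        base
    final.getD n []   -- keys always present where Python indexes (getD default never used under Pre_)

-- ===== PRECONDITION & SPEC =====
-- Pre_ excludes only d < 0 with d ≤ n, where Python A recurses forever (RecursionError); A returns on everything else.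
def Pre_get_sol_comb_problem (n : Int) (d : Int) : Prop := d < 0 → n < d
instance (n : Int) (d : Int) : Decidable (Pre_get_sol_comb_problem n d) := by
  unfold Pre_get_sol_comb_problem; infer_instance
def pvWitness_get_sol_comb_problem : Int × Int := (5, 3)

-- For d < 0 with d ≤ n Python A recurses without reaching a base case and raises RecursionError; B returns [].
def Raises_get_sol_comb_problem (n : Int) (d : Int) : Prop := d < 0 ∧ d ≤ n
instance (n : Int) (d : Int) : Decidable (Raises_get_sol_comb_problem n d) := by
  unfold Raises_get_sol_comb_problem; infer_instance
def pvRaiseWitness_get_sol_comb_problem : Int × Int := (0, -1)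
def pvRaiseWitnessOut_get_sol_comb_problem : List (List Int) := []

def Spec_get_sol_comb_problem (n : Int) (d : Int) (out : List (List Int)) : Prop :=
  out = get_sol_comb_problem_alt n d
instance (n : Int) (d : Int) (out : List (List Int)) : Decidable (Spec_get_sol_comb_problem n d out) := by
  unfold Spec_get_sol_comb_problem; infer_instance

-- ===== CLAIM (what is proved, stated in full; the proofs are below) =====
def Claim_equal_get_sol_comb_problem : Prop :=
  ∀ (n : Int) (d : Int), Dom_get_sol_comb_problem n d → Pre_get_sol_comb_problem n d →
    Spec_get_sol_comb_problem n d (get_sol_comb_problem n d)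

def Claim_raises_get_sol_comb_problem : Prop :=
  (∀ (n : Int) (d : Int), Dom_get_sol_comb_problem n d → Raises_get_sol_comb_problem n d →
    ¬ Pre_get_sol_comb_problem n d) ∧
  (Dom_get_sol_comb_problem (pvRaiseWitness_get_sol_comb_problem.1) (pvRaiseWitness_get_sol_comb_problem.2) ∧
   Raises_get_sol_comb_problem (pvRaiseWitness_get_sol_comb_problem.1) (pvRaiseWitness_get_sol_comb_problem.2) ∧
   get_sol_comb_problem_alt (pvRaiseWitness_get_sol_comb_problem.1) (pvRaiseWitness_get_sol_comb_problem.2) =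
     pvRaiseWitnessOut_get_sol_comb_problem)

-- ===== LEMMAS AND PROOFS =====

-- the dict B's loop holds after level k: keys k .. n-d+k, value at m = A's answer for (m, k)
def pvLevel (n d k : Int) : PySem.Dict Int (List (List Int)) :=
  PySem.Dict.mk ((PySem.List.pyRange k (n - d + k + 1) 1).map
    (fun m => (m, get_sol_comb_problem m k)))

theorem pvA_base (n : Int) (h : 1 ≤ n) : get_sol_comb_problem n 1 = [[n]] := by
  rw [get_sol_comb_problem]
  simp [show ¬ (1 : Int) > n from by omega]

theorem pvA_rec (n d : Int) (h2 : 2 ≤ d) (hdn : d ≤ n) :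
    get_sol_comb_problem n d =
      (PySem.List.pyRange 1 (n - d + 2) 1).flatMap
        (fun i => (get_sol_comb_problem (n - i) (d - 1)).map (fun x => x ++ [i])) := by
  rw [get_sol_comb_problem]
  have h0 : (d == 0 || d > n) = false := by simp; omega
  have h1 : (d == 1) = false := by simp; omega
  simp only [h0, h1, Bool.false_eq_true, if_false, dif_pos h2]
  rw [PySem.List.foldl_append_eq_flatMap]
  simp

theorem pvLevel_keys_nodup (n d k : Int) : (pvLevel n d k).keys.Nodup := by
  unfold pvLevel
  simp [PySem.Dict.keys]
  exact List.Nodup.map (fun a b hab => by simpa using hab)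
    (PySem.List.nodup_pyRange_one _ _)

theorem pvLevel_getD (n d k m : Int) (hm : k ≤ m ∧ m < n - d + k + 1) :
    (pvLevel n d k).getD m [] = get_sol_comb_problem m k := by
  apply PySem.Dict.getD_of_mem_items
  · show (m, get_sol_comb_problem m k) ∈ _
    simp [pvLevel]
    omega
  · exact pvLevel_keys_nodup n d k

-- B's base comprehension builds level 1
theorem pvBase_eq (n d : Int) :
    (PySem.List.pyRange 1 (n - d + 2) 1).foldl
        (fun dic m => dic.insert m [[m]]) PySem.Dict.empty = pvLevel n d 1 := by
  have hit := PySem.Dict.items_foldl_insert_fresh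
    (l := PySem.List.pyRange 1 (n - d + 2) 1)
    (k := fun m => m) (v := fun m => [[m]]) (d := PySem.Dict.empty)
    (by intro a _; simp) (by simpa using PySem.List.nodup_pyRange_one 1 (n - d + 2))
  cases hfold : (PySem.List.pyRange 1 (n - d + 2) 1).foldl
      (fun dic m => dic.insert m [[m]]) PySem.Dict.empty with
  | mk items =>
    have : items = (PySem.List.pyRange 1 (n - d + 2) 1).map (fun m => (m, [[m]])) := by
      have := hit; rw [hfold] at this; simpa [PySem.Dict.items] using this
    subst this
    unfold pvLevel
    have h2 : n - d + 1 + 1 = n - d + 2 := by ring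
    rw [h2]
    congr 1
    apply List.map_congr_left
    intro m hm
    rw [PySem.List.mem_pyRange_one] at hm
    rw [pvA_base m (by omega)]

-- B's inner loop, fed level (k-1), builds level k
theorem pvStep_eq (n d k : Int) (h2 : 2 ≤ k) (_hk : k ≤ d) (_hd : d ≤ n) :
    (PySem.List.pyRange k (n - d + k + 1) 1).foldl
        (fun cur m =>
          cur.insert m
            ((PySem.List.pyRange 1 (m - k + 2) 1).flatMap
              (fun i => ((pvLevel n d (k - 1)).getD (m - i) []).map (fun x => x ++ [i]))))
        PySem.Dict.empty = pvLevel n d k := by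
  have hit := PySem.Dict.items_foldl_insert_fresh
    (l := PySem.List.pyRange k (n - d + k + 1) 1)
    (k := fun m => m)
    (v := fun m => (PySem.List.pyRange 1 (m - k + 2) 1).flatMap
      (fun i => ((pvLevel n d (k - 1)).getD (m - i) []).map (fun x => x ++ [i])))
    (d := PySem.Dict.empty)
    (by intro a _; simp) (by simpa using PySem.List.nodup_pyRange_one k (n - d + k + 1))
  cases hfold : (PySem.List.pyRange k (n - d + k + 1) 1).foldl
      (fun cur m =>
        cur.insert m
          ((PySem.List.pyRange 1 (m - k + 2) 1).flatMap
            (fun i => ((pvLevel n d (k - 1)).getD (m - i) []).map (fun x => x ++ [i]))))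
      PySem.Dict.empty with
  | mk items =>
    have hitems : items = (PySem.List.pyRange k (n - d + k + 1) 1).map
        (fun m => (m, (PySem.List.pyRange 1 (m - k + 2) 1).flatMap
          (fun i => ((pvLevel n d (k - 1)).getD (m - i) []).map (fun x => x ++ [i])))) := by
      have := hit; rw [hfold] at this; simpa [PySem.Dict.items] using this
    subst hitems
    have hmapeq : (PySem.List.pyRange k (n - d + k + 1) 1).map
        (fun m => (m, (PySem.List.pyRange 1 (m - k + 2) 1).flatMap
          (fun i => ((pvLevel n d (k - 1)).getD (m - i) []).map (fun x => x ++ [i])))) =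
        (PySem.List.pyRange k (n - d + k + 1) 1).map
        (fun m => (m, get_sol_comb_problem m k)) := by
      apply List.map_congr_left
      intro m hm
      rw [PySem.List.mem_pyRange_one] at hm
      have hval : (PySem.List.pyRange 1 (m - k + 2) 1).flatMap
          (fun i => ((pvLevel n d (k - 1)).getD (m - i) []).map (fun x => x ++ [i])) =
          (PySem.List.pyRange 1 (m - k + 2) 1).flatMap
          (fun i => (get_sol_comb_problem (m - i) (k - 1)).map (fun x => x ++ [i])) := by
        rw [List.flatMap_def, List.flatMap_def]
        refine congrArg List.flatten (List.map_congr_left ?_)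
        intro i hi
        rw [PySem.List.mem_pyRange_one] at hi
        rw [pvLevel_getD n d (k - 1) (m - i) (by omega)]
      rw [hval, ← pvA_rec m k h2 (by omega)]
    unfold pvLevel
    exact congrArg PySem.Dict.mk hmapeq

-- the outer loop over k = 2 .. K produces level K
theorem pvOuter (n d : Int) (hd : d ≤ n) :
    ∀ K : Int, 1 ≤ K → K ≤ d →
      (PySem.List.pyRange 2 (K + 1) 1).foldl
        (fun prev k =>
          (PySem.List.pyRange k (n - d + k + 1) 1).foldl
            (fun cur m =>
              cur.insert m
                ((PySem.List.pyRange 1 (m - k + 2) 1).flatMap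
                  (fun i => (prev.getD (m - i) []).map (fun x => x ++ [i]))))
            PySem.Dict.empty)
        ((PySem.List.pyRange 1 (n - d + 2) 1).foldl
          (fun dic m => dic.insert m [[m]]) PySem.Dict.empty) = pvLevel n d K := by
  intro K hK1
  induction K, hK1 using Int.le_induction with
  | base =>
    intro _
    rw [show PySem.List.pyRange 2 (1 + 1) 1 = [] from
      PySem.List.pyRange_one_eq_nil (by omega)]
    simpa using pvBase_eq n d
  | succ K hK ih =>
    intro hKd
    rw [PySem.List.pyRange_one_succ_right (by omega), List.foldl_append, ih (by omega)]
    simp only [List.foldl_cons, List.foldl_nil]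
    have := pvStep_eq n d (K + 1) (by omega) (by omega) hd
    simpa using this

theorem get_sol_comb_problem_eq_alt (n d : Int) (hpre : Pre_get_sol_comb_problem n d) :
    get_sol_comb_problem n d = get_sol_comb_problem_alt n d := by
  unfold get_sol_comb_problem_alt
  by_cases hcase : d < 1 ∨ d > n
  · have hguard : (d < 1 || d > n) = true := by
      rcases hcase with h | h <;> simp [h]
    rw [if_pos hguard]
    rw [get_sol_comb_problem]
    unfold Pre_get_sol_comb_problem at hpre
    have h0 : (d == 0 || d > n) = true := by
      rcases hcase with h | h
      · rcases lt_or_eq_of_le (by omega : d ≤ 0) with hlt | heq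
        · have := hpre hlt; simp; omega
        · simp [heq]
      · simp; omega
    simp [h0]
  · rw [not_or, not_lt, not_lt] at hcase
    obtain ⟨h1, hdn⟩ := hcase
    have hguard : (d < 1 || d > n) = false := by simp; omega
    rw [if_neg (by simp [hguard])]
    simp only
    rw [pvOuter n d hdn d (by omega) le_rfl]
    rw [pvLevel_getD n d d n (by omega)]

-- ===== VERDICT (by name: the statement is the Claim_ definition above) =====
theorem get_sol_comb_problem_spec : Claim_equal_get_sol_comb_problem := by
  intro n d _ hpre
  exact get_sol_comb_problem_eq_alt n d hpre

theorem get_sol_comb_problem_raises : Claim_raises_get_sol_comb_problem := by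
  unfold Claim_raises_get_sol_comb_problem
  exact ⟨fun n d _ hr hpre => absurd (hpre hr.1) (not_lt.mpr hr.2), by decide⟩

-- self-check: the raise witness lies in Raises_ and B's port returns the stated value there
theorem pvRaiseWitness_ok :
    Raises_get_sol_comb_problem 0 (-1) ∧
      get_sol_comb_problem_alt 0 (-1) = pvRaiseWitnessOut_get_sol_comb_problem :=
  ⟨get_sol_comb_problem_raises.2.2.1, get_sol_comb_problem_raises.2.2.2⟩
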